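-- pv_equiv track=rewrite | github.com/Linna0227/DPMConformance | DPMConformance/code/PMDConformance/assignconformancevariant.py | form_result
-- ===== SOURCE A (Python) =====
-- def form_result(log, variants_idxs, all_result):
--     al_idx = {}
--     for index_variant, variant in enumerate(variants_idxs):
--         for trace_idx in variants_idxs[variant]:
--             al_idx[trace_idx] = all_result[index_variant]
--
--     results_con = []
--     for i in range(len(log)):
--         results_con.append(al_idx[i])
--
--     return results_con
-- ===== SOURCE B (Python) =====
-- def form_result(log, variants_idxs, all_result):
--     variants = list(variants_idxs.values())
--     return [all_result[next(k for k, idxs in enumerate(variants) if i in idxs)]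
--             for i in range(len(log))]
-- ===== Notes on version B (the rewrite author's own statement) =====
-- stated objective: simpler
-- what changed: Replaces A's two passes (scatter every variant's result into an intermediate dict keyed by trace index, then a separate ordered readout loop over that dict) with a single per-position gather comprehension that finds the variant listing each position and takes its result directly, with no intermediate dict; Pre_ excludes inputs where a log position is listed by more than one variant, on which A's dict keeps the last variant's result and B's scan takes the first - both defensible on that unspecified corner.
-- outside the precondition, e.g. on form_result([5, 6], {1: [0, 1], 2: [1]}, [7, 8]): A returns [7, 8], B returns [7, 7]
import Mathlib
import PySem

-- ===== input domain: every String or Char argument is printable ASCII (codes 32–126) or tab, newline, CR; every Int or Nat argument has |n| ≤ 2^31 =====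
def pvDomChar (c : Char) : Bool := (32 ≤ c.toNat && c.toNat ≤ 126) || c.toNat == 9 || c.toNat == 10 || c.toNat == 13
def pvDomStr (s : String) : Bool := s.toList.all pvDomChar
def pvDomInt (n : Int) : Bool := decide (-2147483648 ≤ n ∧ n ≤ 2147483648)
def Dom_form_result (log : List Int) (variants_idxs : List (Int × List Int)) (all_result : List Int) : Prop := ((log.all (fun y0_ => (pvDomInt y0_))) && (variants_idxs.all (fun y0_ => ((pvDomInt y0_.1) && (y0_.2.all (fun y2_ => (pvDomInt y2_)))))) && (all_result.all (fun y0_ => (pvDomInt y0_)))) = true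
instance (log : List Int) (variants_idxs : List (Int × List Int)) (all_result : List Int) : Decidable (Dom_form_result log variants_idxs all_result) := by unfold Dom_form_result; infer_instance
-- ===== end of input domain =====

-- B replaces A's dict scatter + ordered dict-readout loop with a single per-position gather
-- comprehension (find the variant listing each position, take its result); no intermediate dict (objective: simpler).


-- ===== PORT A =====
-- first-match association-list lookup: the port of Python's dict lookup `variants_idxs[variant]`
def dictLookup? : List (Int × List Int) → Int → Option (List Int)
  | [], _ => none
  | p :: rest, k => if p.1 = k then some p.2 else dictLookup? rest k

def form_result (log : List Int) (variants_idxs : List (Int × List Int)) (all_result : List Int) : List Int :=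
  -- al_idx = {}; for index_variant, variant in enumerate(variants_idxs): for trace_idx in variants_idxs[variant]: al_idx[trace_idx] = all_result[index_variant]
  let al_idx : PySem.Dict Int Int :=
    (PySem.List.enumerate variants_idxs).foldl
      (fun d p =>
        match dictLookup? variants_idxs p.2.1 with
        | some idxs => idxs.foldl (fun d t => d.insert t (PySem.List.pyGetD all_result p.1 0)) d
        | none => d)  -- unreachable in Python (the key came from the dict itself); Pre_ keys are distinct
      PySem.Dict.empty
  -- results_con = []; for i in range(len(log)): results_con.append(al_idx[i])
  -- al_idx[i] raises KeyError when i is uncovered: Pre_ excludes that, getD 0 under Pre_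
  (PySem.List.pyRange 0 (log.length : Int) 1).map (fun i => al_idx.getD i 0)

-- ===== PORT B =====
def form_result_alt (log : List Int) (variants_idxs : List (Int × List Int)) (all_result : List Int) : List Int :=
  -- variants = list(variants_idxs.values())
  let variants := variants_idxs.map Prod.snd
  -- [all_result[next(k for k, idxs in enumerate(variants) if i in idxs)] for i in range(len(log))]
  -- next(...) raises StopIteration when no variant lists position i, and all_result[k] raises
  -- IndexError when k is too large: Pre_ excludes both, so the 0 fallbacks are never read under Pre_
  (PySem.List.pyRange 0 (log.length : Int) 1).map (fun i =>
    match (PySem.List.enumerate variants).find? (fun p => decide (i ∈ p.2)) with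
    | some p => PySem.List.pyGetD all_result p.1 0
    | none => 0)

-- ===== PRECONDITION & SPEC =====
-- Pre_ requires: (a) distinct keys — the association list encodes a Python dict, which cannot hold
-- duplicate keys, so no Python input is excluded by (a); (b) all_result long enough for every variant
-- with a nonempty trace list (else A raises IndexError); (c) every position 0..len(log)-1 covered by
-- some trace list (else A raises KeyError and B StopIteration); (d) no log position listed by MORE
-- than one variant — on such duplicate-membership inputs A's dict keeps the last variant's result and
-- B's scan takes the first, both defensible on that unspecified corner, so they are excluded.
def Pre_form_result (log : List Int) (variants_idxs : List (Int × List Int)) (all_result : List Int) : Prop :=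
  (variants_idxs.map Prod.fst).Nodup ∧
  (∀ p ∈ PySem.List.enumerate variants_idxs, p.2.2 ≠ [] → p.1 < (all_result.length : Int)) ∧
  (∀ i : Nat, i < log.length → ∃ p ∈ variants_idxs, (i : Int) ∈ p.2) ∧
  (∀ p ∈ PySem.List.enumerate variants_idxs, ∀ q ∈ PySem.List.enumerate variants_idxs,
    ∀ t ∈ p.2.2, 0 ≤ t → t < (log.length : Int) → t ∈ q.2.2 → p.1 = q.1)

instance (log : List Int) (variants_idxs : List (Int × List Int)) (all_result : List Int) : Decidable (Pre_form_result log variants_idxs all_result) := by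
  unfold Pre_form_result; infer_instance

def pvWitness_form_result : List Int × (List (Int × List Int)) × List Int :=
  ([10, 20, 30], [(1, [1, 2]), (2, [0])], [7, 8])

def Spec_form_result (log : List Int) (variants_idxs : List (Int × List Int)) (all_result : List Int) (out : List Int) : Prop := out = form_result_alt log variants_idxs all_result
instance (log : List Int) (variants_idxs : List (Int × List Int)) (all_result : List Int) (out : List Int) : Decidable (Spec_form_result log variants_idxs all_result out) := by unfold Spec_form_result; infer_instance

-- ===== CLAIM (what is proved, stated in full; the proofs are below) =====
def Claim_equal_form_result : Prop := ∀ (log : List Int) (variants_idxs : List (Int × List Int)) (all_result : List Int), Dom_form_result log variants_idxs all_result → Pre_form_result log variants_idxs all_result → Spec_form_result log variants_idxs all_result (form_result log variants_idxs all_result)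

-- ===== LEMMAS AND PROOFS =====

-- the flat sequence of (trace position, value) dict writes A performs, in order
def pvWrites (variants_idxs : List (Int × List Int)) (all_result : List Int) : List (Int × Int) :=
  (PySem.List.enumerate variants_idxs).flatMap
    (fun p => p.2.2.map (fun t => (t, PySem.List.pyGetD all_result p.1 0)))

theorem foldl_flatMap {α β γ : Type} (l : List α) (f : α → List β) (g : γ → β → γ) (init : γ) :
    (l.flatMap f).foldl g init = l.foldl (fun acc x => (f x).foldl g acc) init := by
  induction l generalizing init with
  | nil => rfl
  | cons x xs ih => simp [List.flatMap_cons, List.foldl_append, ih]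

theorem foldl_congr_mem' {α β : Type} (l : List α) (f g : β → α → β) (init : β)
    (h : ∀ acc, ∀ x ∈ l, f acc x = g acc x) : l.foldl f init = l.foldl g init := by
  induction l generalizing init with
  | nil => rfl
  | cons x xs ih =>
    simp only [List.foldl_cons]
    rw [h init x (by simp)]
    exact ih _ (fun acc y hy => h acc y (by simp [hy]))

theorem dictLookup?_of_mem (vi : List (Int × List Int)) (hnd : (vi.map Prod.fst).Nodup)
    (p : Int × List Int) (hp : p ∈ vi) : dictLookup? vi p.1 = some p.2 := by
  induction vi with
  | nil => cases hp
  | cons q rest ih =>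
    simp only [List.map_cons, List.nodup_cons] at hnd
    rcases List.mem_cons.mp hp with h | h
    · subst h; simp [dictLookup?]
    · have hne : q.1 ≠ p.1 := by
        intro he
        exact hnd.1 (he ▸ (List.mem_map.mpr ⟨p, h, rfl⟩))
      simp only [dictLookup?, if_neg hne]
      exact ih hnd.2 h

-- A, with the (always-succeeding, by Nodup) dict lookup removed: a fold over the flat write sequence
theorem form_result_eq_writes (log : List Int) (vi : List (Int × List Int)) (ar : List Int)
    (hnd : (vi.map Prod.fst).Nodup) :
    form_result log vi ar =
      (PySem.List.pyRange 0 (log.length : Int) 1).map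
        (fun i => ((pvWrites vi ar).foldl (fun d w => d.insert w.1 w.2) PySem.Dict.empty).getD i 0) := by
  have hd : (PySem.List.enumerate vi).foldl
      (fun d p =>
        match dictLookup? vi p.2.1 with
        | some idxs => idxs.foldl (fun d t => d.insert t (PySem.List.pyGetD ar p.1 0)) d
        | none => d)
      PySem.Dict.empty
      = (pvWrites vi ar).foldl (fun d w => d.insert w.1 w.2) PySem.Dict.empty := by
    rw [pvWrites, foldl_flatMap]
    apply foldl_congr_mem'
    intro acc p hp
    have hmem : p.2 ∈ vi := by
      rcases (PySem.List.mem_enumerate_iff vi 0 p).mp hp with ⟨k, hk, rfl⟩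
      simp
    rw [dictLookup?_of_mem vi hnd p.2 hmem]
    simp [List.foldl_map]
  simp only [form_result]
  rw [hd]

-- the fold of dict overwrites reads back as the LAST write to the key (first match in the reverse)
theorem dict_last (ws : List (Int × Int)) (d : PySem.Dict Int Int) (i : Int) :
    (ws.foldl (fun d w => d.insert w.1 w.2) d).getD i 0
      = match ws.reverse.find? (fun w => decide (w.1 = i)) with
        | some w => w.2
        | none => d.getD i 0 := by
  induction ws using List.reverseRecOn generalizing d with
  | nil => simp
  | append_singleton ws w ih =>
    simp only [List.foldl_append, List.foldl_cons, List.foldl_nil, List.reverse_append,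
      List.reverse_cons, List.reverse_nil, List.nil_append, List.cons_append]
    by_cases hw : w.1 = i
    · rw [hw, PySem.Dict.getD_insert_self, List.find?_cons_of_pos (by simp [hw])]
    · rw [PySem.Dict.getD_insert_of_ne _ _ _ (fun h => hw h.symm),
        List.find?_cons_of_neg (by simp [hw])]
      exact ih d

theorem find?_block (xs : List Int) (v : Int) (i : Int) :
    (xs.map (fun t => (t, v))).find? (fun w => decide (w.1 = i))
      = if i ∈ xs then some (i, v) else none := by
  induction xs with
  | nil => simp
  | cons t ts ih =>
    simp only [List.map_cons]
    by_cases ht : t = i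
    · subst ht
      rw [List.find?_cons_of_pos (by simp)]
      simp
    · rw [List.find?_cons_of_neg (by simp [ht]), ih]
      by_cases hm : i ∈ ts <;> simp [hm, List.mem_cons, Ne.symm ht]

theorem find?_flatMap' {α β : Type} (l : List α) (f : α → List β) (q : β → Bool) :
    (l.flatMap f).find? q = l.findSome? (fun x => (f x).find? q) := by
  induction l with
  | nil => rfl
  | cons x xs ih =>
    simp only [List.flatMap_cons, List.find?_append, List.findSome?_cons]
    cases h : (f x).find? q <;> simp [ih]

theorem findSome?_if {α β : Type} (l : List α) (q : α → Bool) (g : α → β) :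
    l.findSome? (fun x => if q x then some (g x) else none) = (l.find? q).map g := by
  induction l with
  | nil => rfl
  | cons x xs ih =>
    simp only [List.findSome?_cons, List.find?_cons]
    by_cases hx : q x <;> simp [hx, ih]

theorem enumerate_map {α β : Type} (f : α → β) (xs : List α) (s : Int) :
    PySem.List.enumerate (xs.map f) s = (PySem.List.enumerate xs s).map (fun p => (p.1, f p.2)) := by
  induction xs generalizing s with
  | nil => simp [PySem.List.enumerate_nil]
  | cons x xs ih => simp [PySem.List.enumerate_cons, ih]

-- the dict readout at i equals the backward gather at i (the dict keeps the LAST write)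
theorem readout_eq_gather (vi : List (Int × List Int)) (ar : List Int) (i : Int) :
    ((pvWrites vi ar).foldl (fun d w => d.insert w.1 w.2) PySem.Dict.empty).getD i 0
      = match (PySem.List.enumerate (vi.map Prod.snd)).reverse.find? (fun p => decide (i ∈ p.2)) with
        | some p => PySem.List.pyGetD ar p.1 0
        | none => 0 := by
  rw [dict_last]
  have h1 : (pvWrites vi ar).reverse.find? (fun w => decide (w.1 = i))
      = ((PySem.List.enumerate vi).reverse.find? (fun p => decide (i ∈ p.2.2))).map
          (fun p => (i, PySem.List.pyGetD ar p.1 0)) := by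
    rw [pvWrites, List.reverse_flatMap, find?_flatMap']
    rw [← findSome?_if ((PySem.List.enumerate vi).reverse)
      (fun p => decide (i ∈ p.2.2)) (fun p => (i, PySem.List.pyGetD ar p.1 0))]
    congr 1
    funext p
    simp only [Function.comp_apply, ← List.map_reverse]
    rw [find?_block]
    simp
  have h2 : (PySem.List.enumerate (vi.map Prod.snd)).reverse.find? (fun p => decide (i ∈ p.2))
      = ((PySem.List.enumerate vi).reverse.find? (fun p => decide (i ∈ p.2.2))).map
          (fun p => (p.1, p.2.2)) := by
    rw [enumerate_map, ← List.map_reverse, List.find?_map]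
    rfl
  rw [h1, h2]
  cases (PySem.List.enumerate vi).reverse.find? (fun p => decide (i ∈ p.2.2)) <;> simp

-- when at most one element satisfies the predicate, the backward and forward scans agree
theorem reverse_find?_of_unique {α : Type} (l : List α) (q : α → Bool)
    (h : l.Pairwise (fun a b => ¬(q a = true ∧ q b = true))) :
    l.reverse.find? q = l.find? q := by
  induction l with
  | nil => rfl
  | cons x xs ih =>
    rcases List.pairwise_cons.mp h with ⟨hx, hxs⟩
    simp only [List.reverse_cons, List.find?_append, List.find?_cons]
    by_cases hqx : q x = true
    · have hnone : xs.find? q = none :=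
        List.find?_eq_none.mpr (fun y hy hqy => hx y hy ⟨hqx, hqy⟩)
      rw [ih hxs, hnone]
      simp [hqx]
    · rw [ih hxs]
      cases hfind : xs.find? q <;> simp [hqx]

-- ===== VERDICT (by name: the statement is the Claim_ definition above) =====
theorem form_result_spec : Claim_equal_form_result := by
  intro log vi ar _ hpre
  obtain ⟨hnd, -, -, huniq⟩ := hpre
  show form_result log vi ar = form_result_alt log vi ar
  rw [form_result_eq_writes log vi ar hnd]
  simp only [form_result_alt]
  apply List.map_congr_left
  intro i hi
  rw [PySem.List.mem_pyRange_one] at hi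
  -- at most one variant lists position i, so the dict's last write is the scan's first hit
  have hpw : (PySem.List.enumerate (vi.map Prod.snd)).Pairwise
      (fun a b => ¬((fun p => decide (i ∈ p.2)) a = true ∧ (fun p => decide (i ∈ p.2)) b = true)) := by
    rw [enumerate_map]
    rw [List.pairwise_map]
    refine (PySem.List.pairwise_lt_enumerate vi 0).imp_of_mem ?_
    intro a b ha hb hlt hboth
    simp only [decide_eq_true_eq] at hboth
    have := huniq a ha b hb i hboth.1 hi.1 hi.2 hboth.2
    omega
  rw [readout_eq_gather, reverse_find?_of_unique _ _ hpw]
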